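-- pv_equiv track=rewrite | github.com/yangzhiye/EOE-AND-EOSC | get_data.py | return_max_sc
-- ===== SOURCE A (Python) =====
-- def return_max_sc(test_Y,train_Y):
--     max_sc = 0
--     for i,line in enumerate(test_Y):
--         for j,word in enumerate(line):
--             if word == 'B':
--                 if max_sc < max(j+1,len(line)-j+1):
--                     max_sc = max(j+1,len(line)-j+1)
--     for i,line in enumerate(train_Y):
--         for j,word in enumerate(line):
--             if word == 'B':
--                 if max_sc < max(j+1,len(line)-j+1):
--                     max_sc = max(j+1,len(line)-j+1)
--     return max_sc
-- ===== SOURCE B (Python) =====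
-- def return_max_sc(test_Y, train_Y):
--     max_sc = 0
--     for line in test_Y + train_Y:
--         if 'B' in line:
--             first = line.index('B')
--             last = len(line) - 1 - line[::-1].index('B')
--             max_sc = max(max_sc, last + 1, len(line) - first + 1)
--     return max_sc
-- ===== Notes on version B (the rewrite author's own statement) =====
-- stated objective: simpler
-- what changed: Replaces A's two nested per-position loops by one chained pass over test_Y+train_Y that, for each line containing 'B', computes only the first and last 'B' positions and takes max(last+1, len-first+1), which provably equals the maximum over all 'B' positions.
import Mathlib
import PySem

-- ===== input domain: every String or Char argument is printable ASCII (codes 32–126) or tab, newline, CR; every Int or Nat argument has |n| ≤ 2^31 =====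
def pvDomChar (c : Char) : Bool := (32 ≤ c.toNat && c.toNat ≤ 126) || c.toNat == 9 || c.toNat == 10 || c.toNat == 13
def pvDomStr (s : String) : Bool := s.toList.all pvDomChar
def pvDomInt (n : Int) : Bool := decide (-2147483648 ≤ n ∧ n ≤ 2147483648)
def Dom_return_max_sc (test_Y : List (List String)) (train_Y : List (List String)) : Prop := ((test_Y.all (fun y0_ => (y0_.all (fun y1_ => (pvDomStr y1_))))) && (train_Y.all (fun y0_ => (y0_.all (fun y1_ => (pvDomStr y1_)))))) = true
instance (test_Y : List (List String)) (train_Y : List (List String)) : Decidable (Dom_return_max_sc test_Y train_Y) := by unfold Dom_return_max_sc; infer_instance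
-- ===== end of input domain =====

-- B replaces A's inner per-position loop by two boundary lookups (first and last 'B')
-- in one chained pass over test_Y + train_Y; objective: simpler.

-- ===== PORT A =====
-- inner loop 'for j,word in enumerate(line): …' of A (same loop body for both passes)
def pvAInner (line : List String) (max_sc : Int) : Int :=
  (PySem.List.enumerate line).foldl
    (fun m jw =>
      if jw.2 == "B" then
        if m < max (jw.1 + 1) ((line.length : Int) - jw.1 + 1) then
          max (jw.1 + 1) ((line.length : Int) - jw.1 + 1)
        else m
      else m) max_sc

def return_max_sc (test_Y : List (List String)) (train_Y : List (List String)) : Int :=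
  let m1 := test_Y.foldl (fun acc line => pvAInner line acc) 0
  train_Y.foldl (fun acc line => pvAInner line acc) m1

-- ===== PORT B =====
-- one chained pass; 'line[::-1]' (full-reverse slice) is ported exactly as List.reverse;
-- 'line.index("B")' is guarded by '"B" in line', so the '.getD 0' default is never taken
def return_max_sc_alt (test_Y : List (List String)) (train_Y : List (List String)) : Int :=
  (test_Y ++ train_Y).foldl
    (fun max_sc line =>
      if "B" ∈ line then
        let first : Int := ((PySem.List.index? line "B").getD 0 : Nat)
        let last : Int := (line.length : Int) - 1 - ((PySem.List.index? line.reverse "B").getD 0 : Nat)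
        max (max max_sc (last + 1)) ((line.length : Int) - first + 1)
      else max_sc) 0

-- ===== PRECONDITION & SPEC =====
def Spec_return_max_sc (test_Y : List (List String)) (train_Y : List (List String)) (out : Int) : Prop := out = return_max_sc_alt test_Y train_Y
instance (test_Y : List (List String)) (train_Y : List (List String)) (out : Int) : Decidable (Spec_return_max_sc test_Y train_Y out) := by unfold Spec_return_max_sc; infer_instance

-- ===== CLAIM (what is proved, stated in full; the proofs are below) =====
def Claim_equal_return_max_sc : Prop := ∀ (test_Y : List (List String)) (train_Y : List (List String)), Dom_return_max_sc test_Y train_Y → Spec_return_max_sc test_Y train_Y (return_max_sc test_Y train_Y)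

-- ===== LEMMAS AND PROOFS =====

-- proof-only recursive reformulation of A's inner loop, with explicit running index k
def pvF (n : Int) : Int → List String → Int → Int
  | _, [], acc => acc
  | k, w :: t, acc => pvF n (k + 1) t (if w = "B" then max acc (max (k + 1) (n - k + 1)) else acc)

theorem pvAInner_eq_pvF (n : Int) (l : List String) :
    ∀ (s : Int) (acc : Int),
      (PySem.List.enumerate l s).foldl
        (fun m jw =>
          if jw.2 == "B" then
            if m < max (jw.1 + 1) (n - jw.1 + 1) then max (jw.1 + 1) (n - jw.1 + 1) else m
          else m) acc = pvF n s l acc := by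
  induction l with
  | nil => intro s acc; simp [PySem.List.enumerate_nil, pvF]
  | cons w t ih =>
    intro s acc
    rw [PySem.List.enumerate_cons]
    simp only [List.foldl_cons, pvF]
    rw [ih]
    congr 1
    by_cases hw : w = "B"
    · simp only [hw, beq_self_eq_true, if_true]
      split_ifs with h <;> omega
    · simp [hw]

theorem pvF_noB (n : Int) : ∀ (l : List String) (k acc : Int), "B" ∉ l → pvF n k l acc = acc := by
  intro l
  induction l with
  | nil => intro k acc _; rfl
  | cons w t ih =>
    intro k acc h
    have hw : w ≠ "B" := fun hw => h (by simp [hw])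
    simp only [pvF, if_neg hw]
    exact ih _ _ (fun hm => h (List.mem_cons_of_mem _ hm))

theorem pvF_key (n : Int) : ∀ (l : List String) (k acc : Int) (a b : Nat),
    PySem.List.index? l "B" = some a →
    PySem.List.index? l.reverse "B" = some b →
    pvF n k l acc =
      max acc (max (k + ((l.length : Int) - 1 - (b : Int)) + 1) (n - (k + (a : Int)) + 1)) := by
  intro l
  induction l with
  | nil =>
    intro k acc a b ha _
    have : ("B" : String) ∈ ([] : List String) :=
      (PySem.List.index?_isSome_iff _ _).1 (by rw [ha]; rfl)
    simp at this
  | cons w t ih =>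
    intro k acc a b ha hb
    by_cases hw : w = "B"
    · subst hw
      rw [PySem.List.index?_cons_self] at ha
      injection ha with ha; subst ha
      by_cases hm : "B" ∈ t
      · -- the last 'B' lies inside t
        have hmem : "B" ∈ t.reverse := by simpa using hm
        rw [List.reverse_cons, PySem.List.index?_append_of_mem _ hmem] at hb
        obtain ⟨a', ha'⟩ := Option.isSome_iff_exists.1 ((PySem.List.index?_isSome_iff _ _).2 hm)
        obtain ⟨hblt, -, -⟩ := PySem.List.getElem_of_index?_eq_some hb
        have hbl : (b : Int) < (t.length : Int) := by
          have := hblt; simp only [List.length_reverse] at this; exact_mod_cast this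
        simp only [pvF, if_pos]
        rw [ih (k + 1) _ a' b ha' hb]
        have ha0 : (0 : Int) ≤ (a' : Int) := Int.natCast_nonneg a'
        have hb0 : (0 : Int) ≤ (b : Int) := Int.natCast_nonneg b
        simp only [List.length_cons]
        push_cast
        omega
      · -- the head is the only 'B'
        have hnot : "B" ∉ t.reverse := by simpa using hm
        rw [List.reverse_cons, PySem.List.index?_append_singleton_self t.reverse _ hnot] at hb
        injection hb with hb
        simp only [pvF, if_pos]
        rw [pvF_noB n t _ _ hm]
        have : b = t.length := by rw [← hb]; simp
        subst this
        simp only [List.length_cons]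
        push_cast
        omega
    · -- head is not 'B'
      have hmcons : "B" ∈ w :: t :=
        (PySem.List.index?_isSome_iff _ _).1 (by rw [ha]; rfl)
      have hm : "B" ∈ t := by
        rcases List.mem_cons.1 hmcons with h | h
        · exact absurd h.symm hw
        · exact h
      rw [PySem.List.index?_cons_of_ne t hw] at ha
      obtain ⟨a', ha', rfl⟩ := Option.map_eq_some_iff.1 ha
      have hmem : "B" ∈ t.reverse := by simpa using hm
      rw [List.reverse_cons, PySem.List.index?_append_of_mem _ hmem] at hb
      simp only [pvF, if_neg hw]
      rw [ih (k + 1) _ a' b ha' hb]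
      simp only [List.length_cons]
      push_cast
      omega

theorem step_eq (acc : Int) (line : List String) :
    pvAInner line acc =
      if "B" ∈ line then
        max (max acc ((line.length : Int) - 1 - (((PySem.List.index? line.reverse "B").getD 0 : Nat) : Int) + 1))
            ((line.length : Int) - (((PySem.List.index? line "B").getD 0 : Nat) : Int) + 1)
      else acc := by
  by_cases hm : "B" ∈ line
  · obtain ⟨a, ha⟩ := Option.isSome_iff_exists.1 ((PySem.List.index?_isSome_iff _ _).2 hm)
    have hmem : "B" ∈ line.reverse := by simpa using hm
    obtain ⟨b, hb⟩ := Option.isSome_iff_exists.1 ((PySem.List.index?_isSome_iff _ _).2 hmem)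
    rw [if_pos hm]
    rw [pvAInner, pvAInner_eq_pvF, pvF_key line.length line 0 acc a b ha hb, ha, hb]
    simp only [Option.getD_some]
    omega
  · rw [if_neg hm, pvAInner, pvAInner_eq_pvF, pvF_noB _ _ _ _ hm]

-- ===== VERDICT (by name: the statement is the Claim_ definition above) =====
theorem return_max_sc_spec : Claim_equal_return_max_sc := by
  intro test_Y train_Y _
  unfold Spec_return_max_sc return_max_sc return_max_sc_alt
  rw [List.foldl_append]
  have hstep :
      (fun (max_sc : Int) (line : List String) =>
        if "B" ∈ line then
          let first : Int := ((PySem.List.index? line "B").getD 0 : Nat)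
          let last : Int := (line.length : Int) - 1 - ((PySem.List.index? line.reverse "B").getD 0 : Nat)
          max (max max_sc (last + 1)) ((line.length : Int) - first + 1)
        else max_sc)
      = (fun (acc : Int) (line : List String) => pvAInner line acc) := by
    funext acc line
    rw [step_eq acc line]
  rw [hstep]
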